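-- pv_equiv track=rewrite | github.com/ThomAaShelby/Temp | program4.py | calc
-- ===== SOURCE A (Python) =====
-- def calc(a):
--     mydict = {}
--     for every in range(1, 10):
--         count = 0
--         for each in a:
--             if each % every == 0:
--                 count += 1
--             mydict[every] = count
--
--     return mydict
-- ===== SOURCE B (Python) =====
-- def calc(a):
--     # Residue-table algorithm: one pass records each element's residue mod 2520
--     # (= lcm(1..9)); divisor counts are then read off the 2520-entry table.
--     freq = {}
--     for x in a:
--         r = x % 2520
--         freq[r] = freq.get(r, 0) + 1
--     return {d: sum(freq.get(r, 0) for r in range(0, 2520, d)) for d in range(1, 10)}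
-- ===== Notes on version B (the rewrite author's own statement) =====
-- stated objective: faster
-- what changed: B builds a frequency table of each element's residue mod 2520 (= lcm 1..9) in one pass and reads each divisor's count off the table, instead of A's nine passes over the array each testing one divisor per element.
-- intended difference: On the empty array A returns {} (its dict assignments sit inside the never-executed inner loop) while B returns {1:0,...,9:0}, the intended zero count for every divisor. — e.g. on calc([]): A returns [], B returns [(1, 0), (2, 0), (3, 0), (4, 0), (5, 0), (6, 0), (7, 0), (8, 0), (9, 0)]
import Mathlib
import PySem

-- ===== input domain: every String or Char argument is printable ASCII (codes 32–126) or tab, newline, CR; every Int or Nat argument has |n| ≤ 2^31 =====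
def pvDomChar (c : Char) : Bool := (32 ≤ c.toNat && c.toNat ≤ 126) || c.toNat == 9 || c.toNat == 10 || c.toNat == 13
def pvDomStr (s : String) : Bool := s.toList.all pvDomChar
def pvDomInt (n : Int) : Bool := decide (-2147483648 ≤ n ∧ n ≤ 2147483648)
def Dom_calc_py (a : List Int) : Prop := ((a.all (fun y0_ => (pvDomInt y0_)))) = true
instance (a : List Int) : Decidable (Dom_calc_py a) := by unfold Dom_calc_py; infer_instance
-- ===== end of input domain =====

-- B replaces A's nine passes over the array by a residue table mod 2520 = lcm(1..9): one pass
-- records each element's residue, then each divisor's count is read off the table (constant-factor faster).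

-- ===== PORT A =====
-- inner loop of A: for each in a: count updated; mydict[every] = count  (state = (count, mydict))
def calcInner (every : Int) (a : List Int) (st0 : Int × PySem.Dict Int Int) :
    Int × PySem.Dict Int Int :=
  a.foldl
    (fun st each =>
      let count := if PySem.Int.mod each every = 0 then st.1 + 1 else st.1
      (count, st.2.insert every count))
    st0

def calc_py (a : List Int) : List (Int × Int) :=
  ((PySem.List.pyRange 1 10 1).foldl
      (fun mydict every => (calcInner every a (0, mydict)).2)
      PySem.Dict.empty).items

-- ===== PORT B =====
-- body of B's first loop: r = x % 2520; freq[r] = freq.get(r, 0) + 1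
def freqStep (d : PySem.Dict Int Int) (x : Int) : PySem.Dict Int Int :=
  let r := PySem.Int.mod x 2520
  d.insert r (d.getD r 0 + 1)

def calc_py_alt (a : List Int) : List (Int × Int) :=
  let freq := a.foldl freqStep PySem.Dict.empty
  -- {d: sum(freq.get(r, 0) for r in range(0, 2520, d)) for d in range(1, 10)}
  ((PySem.List.pyRange 1 10 1).foldl
      (fun out dd =>
        out.insert dd ((PySem.List.pyRange 0 2520 dd).foldl (fun s r => s + freq.getD r 0) 0))
      PySem.Dict.empty).items

-- ===== PRECONDITION & SPEC =====
-- On the empty array A returns {} (its assignments sit inside the never-executed inner loop) while B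
-- returns the intended zero count for every divisor 1..9.
def D_calc_py (a : List Int) : Prop := a = []
instance (a : List Int) : Decidable (D_calc_py a) := by unfold D_calc_py; infer_instance

def Spec_calc_py (a : List Int) (out : List (Int × Int)) : Prop := ¬ D_calc_py a → out = calc_py_alt a
instance (a : List Int) (out : List (Int × Int)) : Decidable (Spec_calc_py a out) := by unfold Spec_calc_py; infer_instance

def pvDiffWitness_calc_py : List Int := []
def pvDiffWitnessOut_calc_py : (List (Int × Int)) × (List (Int × Int)) :=
  ([], [(1, 0), (2, 0), (3, 0), (4, 0), (5, 0), (6, 0), (7, 0), (8, 0), (9, 0)])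

-- ===== CLAIM (what is proved, stated in full; the proofs are below) =====
def Claim_unchanged_calc_py : Prop := ∀ (a : List Int), Dom_calc_py a → Spec_calc_py a (calc_py a)
def Claim_changed_calc_py : Prop := Dom_calc_py (pvDiffWitness_calc_py) ∧ D_calc_py (pvDiffWitness_calc_py) ∧ calc_py (pvDiffWitness_calc_py) = pvDiffWitnessOut_calc_py.1 ∧ calc_py_alt (pvDiffWitness_calc_py) = pvDiffWitnessOut_calc_py.2 ∧ pvDiffWitnessOut_calc_py.1 ≠ pvDiffWitnessOut_calc_py.2
def Claim_exact_calc_py : Prop := ∀ (a : List Int), Dom_calc_py a → D_calc_py a → calc_py a ≠ calc_py_alt a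

-- ===== LEMMAS AND PROOFS =====

-- number of elements of a divisible by d (as Python count, an Int)
def cdiv (d : Int) (a : List Int) : Int :=
  (a.countP (fun x => decide (PySem.Int.mod x d = 0)) : Int)

lemma cdiv_cons (d x : Int) (xs : List Int) :
    cdiv d (x :: xs) = (if PySem.Int.mod x d = 0 then (1 : Int) else 0) + cdiv d xs := by
  by_cases h : PySem.Int.mod x d = 0 <;> simp [cdiv, List.countP_cons, h] <;> push_cast <;> ring

lemma hrange : PySem.List.pyRange 1 10 1 = [1, 2, 3, 4, 5, 6, 7, 8, 9] := by decide

-- ---- A's side (nine passes, each pass counts one divisor) ----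

lemma innerA_spec (every : Int) :
    ∀ (a : List Int), a ≠ [] → ∀ (c0 : Int) (dict : PySem.Dict Int Int),
      calcInner every a (c0, dict)
        = (c0 + cdiv every a, dict.insert every (c0 + cdiv every a)) := by
  intro a
  induction a with
  | nil => intro h; exact absurd rfl h
  | cons x xs ih =>
    intro _ c0 dict
    rcases List.eq_nil_or_concat' xs with hx | _
    · subst hx
      by_cases h : PySem.Int.mod x every = 0 <;>
        simp [calcInner, cdiv, List.countP_cons, h]
    · have hxs : xs ≠ [] := by
        rintro rfl
        simp_all
      have hstep : calcInner every (x :: xs) (c0, dict)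
          = calcInner every xs
              ((if PySem.Int.mod x every = 0 then c0 + 1 else c0),
               dict.insert every (if PySem.Int.mod x every = 0 then c0 + 1 else c0)) := by
        simp [calcInner]
      rw [hstep, ih hxs]
      rw [PySem.Dict.insert_insert_self]
      have : (if PySem.Int.mod x every = 0 then c0 + 1 else c0) + cdiv every xs
          = c0 + cdiv every (x :: xs) := by
        by_cases h : PySem.Int.mod x every = 0 <;> simp [cdiv_cons, h] <;> ring
      rw [this]

lemma innerA_snd (a : List Int) (ha : a ≠ []) (every : Int) (d : PySem.Dict Int Int) :
    (calcInner every a (0, d)).2 = d.insert every (cdiv every a) := by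
  rw [innerA_spec every a ha 0 d]; simp

lemma calcA_eq (a : List Int) (ha : a ≠ []) :
    calc_py a = [(1, cdiv 1 a), (2, cdiv 2 a), (3, cdiv 3 a), (4, cdiv 4 a),
                 (5, cdiv 5 a), (6, cdiv 6 a), (7, cdiv 7 a), (8, cdiv 8 a), (9, cdiv 9 a)] := by
  simp only [calc_py, hrange, List.foldl_cons, List.foldl_nil, innerA_snd a ha]
  simp [PySem.Dict.insert, PySem.Dict.contains, PySem.Dict.empty]

-- ---- B's side (residue table mod 2520) ----

-- the sum B reads off the table for divisor d
def Ssum (d : Int) (freq : PySem.Dict Int Int) : Int :=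
  ((PySem.List.pyRange 0 2520 d).map (fun r => freq.getD r 0)).sum

lemma nodup_range_step (d : Int) (hd : 0 < d) : (PySem.List.pyRange 0 2520 d).Nodup := by
  rw [PySem.List.pyRange_of_pos _ _ hd]
  refine List.Nodup.map ?_ List.nodup_range
  intro i j h
  simp only [zero_add] at h
  exact_mod_cast mul_left_cancel₀ hd.ne' h

lemma map_getD_insert_not_mem (l : List Int) (freq : PySem.Dict Int Int) (k v : Int)
    (hk : k ∉ l) :
    l.map (fun r => (freq.insert k v).getD r 0) = l.map (fun r => freq.getD r 0) := by
  refine List.map_congr_left (fun r hr => ?_)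
  exact PySem.Dict.getD_insert_of_ne _ _ _ (fun h => hk (h ▸ hr))

lemma sum_getD_insert (l : List Int) (hl : l.Nodup) (freq : PySem.Dict Int Int) (k v : Int) :
    (l.map (fun r => (freq.insert k v).getD r 0)).sum
      = (l.map (fun r => freq.getD r 0)).sum + (if k ∈ l then v - freq.getD k 0 else 0) := by
  induction l with
  | nil => simp
  | cons h t ih =>
    have hnd : t.Nodup := (List.nodup_cons.mp hl).2
    have hnm : h ∉ t := (List.nodup_cons.mp hl).1
    by_cases hk : h = k
    · subst hk
      have hkt : h ∉ t := hnm
      rw [List.map_cons, List.map_cons, List.sum_cons, List.sum_cons,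
          PySem.Dict.getD_insert_self, map_getD_insert_not_mem t freq h v hkt]
      simp only [List.mem_cons, true_or, if_true, hkt, if_false]
      ring
    · rw [List.map_cons, List.map_cons, List.sum_cons, List.sum_cons,
          PySem.Dict.getD_insert_of_ne _ _ _ hk, ih hnd]
      by_cases hmem : k ∈ t
      · simp only [List.mem_cons, hmem, or_true, if_true]; ring
      · have hkh : ¬ k = h := fun h' => hk h'.symm
        simp [hmem, hkh]

lemma mem_range_iff_mod (d x : Int) (hd : 0 < d) (hdvd : d ∣ 2520) :
    (PySem.Int.mod x 2520 ∈ PySem.List.pyRange 0 2520 d) ↔ PySem.Int.mod x d = 0 := by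
  rw [PySem.List.mem_pyRange_iff_of_pos hd, PySem.Int.mod_eq_zero_iff_dvd]
  have h0 : (0:Int) ≤ PySem.Int.mod x 2520 := PySem.Int.mod_nonneg x (by norm_num)
  have h1 : PySem.Int.mod x 2520 < 2520 := PySem.Int.mod_lt x (by norm_num)
  have hx : PySem.Int.floordiv x 2520 * 2520 + PySem.Int.mod x 2520 = x :=
    PySem.Int.floordiv_mul_add_mod x 2520
  obtain ⟨c, hc⟩ := hdvd
  constructor
  · rintro ⟨-, -, e, he⟩
    refine ⟨PySem.Int.floordiv x 2520 * c + e, ?_⟩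
    have hm : PySem.Int.mod x 2520 = d * e := by linarith
    calc x = PySem.Int.floordiv x 2520 * 2520 + PySem.Int.mod x 2520 := hx.symm
      _ = d * (PySem.Int.floordiv x 2520 * c + e) := by rw [hm, hc]; ring
  · rintro ⟨e, he⟩
    refine ⟨h0, h1, e - PySem.Int.floordiv x 2520 * c, ?_⟩
    have : PySem.Int.mod x 2520 = x - PySem.Int.floordiv x 2520 * 2520 := by linarith [hx]
    rw [this, he, hc]; ring

lemma Ssum_step (d : Int) (hd : 0 < d) (hdvd : d ∣ 2520) (x : Int)
    (freq : PySem.Dict Int Int) :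
    Ssum d (freqStep freq x) = Ssum d freq + (if PySem.Int.mod x d = 0 then 1 else 0) := by
  unfold Ssum freqStep
  rw [sum_getD_insert _ (nodup_range_step d hd) freq _ _]
  by_cases h : PySem.Int.mod x d = 0
  · rw [if_pos ((mem_range_iff_mod d x hd hdvd).mpr h), if_pos h]; ring
  · rw [if_neg (fun hm => h ((mem_range_iff_mod d x hd hdvd).mp hm)), if_neg h]

lemma Ssum_foldl (d : Int) (hd : 0 < d) (hdvd : d ∣ 2520) :
    ∀ (a : List Int) (freq : PySem.Dict Int Int),
      Ssum d (a.foldl freqStep freq) = Ssum d freq + cdiv d a := by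
  intro a
  induction a with
  | nil => intro freq; simp [cdiv]
  | cons x xs ih =>
    intro freq
    rw [List.foldl_cons, ih, Ssum_step d hd hdvd, cdiv_cons]
    ring

lemma Ssum_empty (d : Int) : Ssum d PySem.Dict.empty = 0 := by
  unfold Ssum
  rw [List.sum_eq_zero]
  intro y hy
  simp only [List.mem_map] at hy
  obtain ⟨r, -, hr⟩ := hy
  simpa [PySem.Dict.getD, PySem.Dict.get?, PySem.Dict.empty] using hr.symm

lemma inner_eq (d : Int) (hd : 0 < d) (hdvd : d ∣ 2520) (a : List Int) :
    (PySem.List.pyRange 0 2520 d).foldl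
        (fun s r => s + (a.foldl freqStep PySem.Dict.empty).getD r 0) 0 = cdiv d a := by
  rw [PySem.List.foldl_add]
  have : ((PySem.List.pyRange 0 2520 d).map
      (fun r => (a.foldl freqStep PySem.Dict.empty).getD r 0)).sum
      = Ssum d (a.foldl freqStep PySem.Dict.empty) := rfl
  rw [this, Ssum_foldl d hd hdvd, Ssum_empty]
  ring

lemma calcB_eq (a : List Int) :
    calc_py_alt a = [(1, cdiv 1 a), (2, cdiv 2 a), (3, cdiv 3 a), (4, cdiv 4 a),
                     (5, cdiv 5 a), (6, cdiv 6 a), (7, cdiv 7 a), (8, cdiv 8 a), (9, cdiv 9 a)] := by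
  have h1 := inner_eq 1 (by norm_num) (by norm_num) a
  have h2 := inner_eq 2 (by norm_num) (by norm_num) a
  have h3 := inner_eq 3 (by norm_num) (by norm_num) a
  have h4 := inner_eq 4 (by norm_num) (by norm_num) a
  have h5 := inner_eq 5 (by norm_num) (by norm_num) a
  have h6 := inner_eq 6 (by norm_num) (by norm_num) a
  have h7 := inner_eq 7 (by norm_num) (by norm_num) a
  have h8 := inner_eq 8 (by norm_num) (by norm_num) a
  have h9 := inner_eq 9 (by norm_num) (by norm_num) a
  simp only [calc_py_alt, hrange, List.foldl_cons, List.foldl_nil,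
    h1, h2, h3, h4, h5, h6, h7, h8, h9]
  simp [PySem.Dict.insert, PySem.Dict.contains, PySem.Dict.empty]

-- ===== VERDICT (by name: the statements are the Claim_ definitions above) =====
theorem calc_py_spec : Claim_unchanged_calc_py := by
  intro a _ hD
  cases a with
  | nil => exact absurd rfl hD
  | cons x xs => rw [calcA_eq (x :: xs) (List.cons_ne_nil x xs), calcB_eq]

theorem calc_py_changed : Claim_changed_calc_py := by
  unfold Claim_changed_calc_py
  refine ⟨by decide, rfl, by decide, ?_, by decide⟩
  show calc_py_alt [] = _
  rw [calcB_eq]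
  simp [cdiv, pvDiffWitnessOut_calc_py]

theorem calc_py_tight : Claim_exact_calc_py := by
  intro a _ hD
  cases hD
  have hA : calc_py [] = [] := by decide
  rw [hA, calcB_eq]
  simp
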